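-- pv_equiv track=rewrite | github.com/kyungsang7/mycodeplus | 2004.py | counting_2
-- ===== SOURCE A (Python) =====
-- def counting_2(num):
--     res = 0
--     if num < 2:
--         return res
--     while num >= 2:
--         res += num // 2
--         num //= 2
--     return res
-- ===== SOURCE B (Python) =====
-- def counting_2(num):
--     if num < 2:
--         return 0
--     return num - bin(num).count('1')
-- ===== Notes on version B (the rewrite author's own statement) =====
-- stated objective: simpler
-- what changed: Replaces the halving accumulation loop with the closed form num minus popcount(num), using the identity that the sum of the successive halvings of n equals n minus its popcount.
import Mathlib
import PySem

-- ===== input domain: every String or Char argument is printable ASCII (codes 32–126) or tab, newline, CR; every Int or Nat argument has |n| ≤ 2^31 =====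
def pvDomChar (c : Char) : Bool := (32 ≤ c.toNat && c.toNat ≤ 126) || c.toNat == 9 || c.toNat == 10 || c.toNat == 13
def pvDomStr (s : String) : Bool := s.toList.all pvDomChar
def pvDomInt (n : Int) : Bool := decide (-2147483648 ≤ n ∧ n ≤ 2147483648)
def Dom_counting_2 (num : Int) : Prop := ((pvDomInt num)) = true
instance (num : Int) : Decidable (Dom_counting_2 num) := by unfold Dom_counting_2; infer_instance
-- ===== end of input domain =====

-- B replaces A's halving loop with the closed form num - popcount(num); objective: simpler.

-- ===== PORT A =====
-- the while loop: res += num // 2; num //= 2 while num >= 2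
def countingLoop (num res : Int) : Int :=
  if h : 2 ≤ num then
    countingLoop (PySem.Int.floordiv num 2) (res + PySem.Int.floordiv num 2)
  else res
termination_by num.toNat
decreasing_by
  rw [PySem.Int.floordiv_eq_ediv_of_pos (by omega)]
  omega

def counting_2 (num : Int) : Int :=
  let res : Int := 0
  if num < 2 then res
  else countingLoop num res

-- ===== PORT B =====
def counting_2_alt (num : Int) : Int :=
  if num < 2 then 0
  else num - PySem.Int.bitCount num

-- ===== PRECONDITION & SPEC =====
def Spec_counting_2 (num : Int) (out : Int) : Prop := out = counting_2_alt num
instance (num : Int) (out : Int) : Decidable (Spec_counting_2 num out) := by unfold Spec_counting_2; infer_instance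

-- ===== CLAIM (what is proved, stated in full; the proofs are below) =====
def Claim_equal_counting_2 : Prop := ∀ (num : Int), Dom_counting_2 num → Spec_counting_2 num (counting_2 num)

-- ===== LEMMAS AND PROOFS =====
theorem countingLoop_eq : ∀ (n : Nat) (num res : Int), num.toNat = n → 1 ≤ num →
    countingLoop num res = res + num - PySem.Int.bitCount num := by
  intro n
  induction n using Nat.strong_induction_on with
  | _ n ih =>
    intro num res hn h1
    rw [countingLoop]
    by_cases h2 : 2 ≤ num
    · rw [dif_pos h2]
      have hdiv : PySem.Int.floordiv num 2 = num / 2 :=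
        PySem.Int.floordiv_eq_ediv_of_pos (by omega)
      have hrec := ih (num / 2).toNat (by omega) (num / 2) (res + num / 2) rfl (by omega)
      rw [hdiv, hrec]
      have hbc := PySem.Int.bitCount_of_pos (n := num) (by omega)
      rw [hdiv] at hbc
      have hmod : PySem.Int.mod num 2 = num % 2 :=
        PySem.Int.mod_eq_emod_of_pos (by omega)
      rw [hmod] at hbc
      have h01 : (num % 2).toNat = num % 2 := by omega
      omega
    · rw [dif_neg h2]
      have : num = 1 := by omega
      subst this
      have : PySem.Int.bitCount 1 = 1 := by decide
      omega

-- ===== VERDICT (by name: the statement is the Claim_ definition above) =====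
theorem counting_2_spec : Claim_equal_counting_2 := by
  intro num _
  unfold Spec_counting_2 counting_2 counting_2_alt
  by_cases h : num < 2
  · simp [h]
  · rw [if_neg h]
    rw [countingLoop_eq num.toNat num 0 rfl (by omega)]
    omega
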